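-- pv_equiv track=rewrite | github.com/sweetnight19/InfoHunter | src/riesgos/evaluacion.py | evaluar_seguridad
-- ===== SOURCE A (Python) =====
-- def evaluar_seguridad(datos):
--     riesgo_seguridad = 0
--
--     # Evaluar el nivel de riesgo de seguridad para cada red social en los datos
--     for red_social, datos_red_social in datos.items():
--         if red_social == "Reddit":
--             # Evaluar el riesgo de seguridad en los datos de Reddit
--             if "http_status" in datos_red_social:
--                 http_status = datos_red_social["http_status"]
--                 # Verificar si la respuesta HTTP indica un error de seguridad
--                 if http_status >= 400:
--                     riesgo_seguridad += 3
--
--         # Agrega más condiciones para evaluar el riesgo de seguridad en otras redes sociales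
--
--     return riesgo_seguridad
-- ===== SOURCE B (Python) =====
-- def evaluar_seguridad(datos):
--     # Direct lookup of the only key the scan ever acts on, instead of looping over all entries.
--     red = datos.get("Reddit")
--     if red is None:
--         return 0
--     http = red.get("http_status")
--     if http is None:
--         return 0
--     return 3 if http >= 400 else 0
-- ===== Notes on version B (the rewrite author's own statement) =====
-- stated objective: simpler
-- what changed: Replaces the linear scan over all of datos.items() with a single direct dict lookup of the only key ('Reddit') the loop ever acts on, then one lookup of 'http_status'.
import Mathlib
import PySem

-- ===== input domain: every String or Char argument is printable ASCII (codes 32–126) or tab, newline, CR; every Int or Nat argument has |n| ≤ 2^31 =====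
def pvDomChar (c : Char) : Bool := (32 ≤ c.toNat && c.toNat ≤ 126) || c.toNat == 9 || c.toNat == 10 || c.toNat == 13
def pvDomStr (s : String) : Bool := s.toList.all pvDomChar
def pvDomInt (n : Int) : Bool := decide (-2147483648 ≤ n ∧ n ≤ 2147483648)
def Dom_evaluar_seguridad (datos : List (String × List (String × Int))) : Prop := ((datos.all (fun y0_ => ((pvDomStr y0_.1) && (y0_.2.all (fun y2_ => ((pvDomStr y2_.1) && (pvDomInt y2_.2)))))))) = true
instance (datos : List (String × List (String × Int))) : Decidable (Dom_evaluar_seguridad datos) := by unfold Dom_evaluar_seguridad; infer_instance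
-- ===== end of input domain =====

-- B replaces A's scan over every entry of the dict with a direct lookup of the
-- single key ("Reddit") the loop ever acts on (objective: simpler).

-- ===== PORT A =====
-- one loop step of A's 'for red_social, datos_red_social in datos.items():'
def pvStepA (r : Int) (p : String × List (String × Int)) : Int :=
  if p.1 == "Reddit" then
    let inner := PySem.Dict.ofList p.2
    if inner.contains "http_status" then
      -- datos_red_social["http_status"]: the 'in' guard makes the key present, so getD is exact here
      let http_status := inner.getD "http_status" 0
      if http_status ≥ 400 then r + 3 else r
    else r
  else r

def evaluar_seguridad (datos : List (String × List (String × Int))) : Int :=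
  (PySem.Dict.ofList datos).items.foldl pvStepA 0

-- ===== PORT B =====
def evaluar_seguridad_alt (datos : List (String × List (String × Int))) : Int :=
  match (PySem.Dict.ofList datos).get? "Reddit" with
  | none => 0
  | some red =>
    match (PySem.Dict.ofList red).get? "http_status" with
    | none => 0
    | some http => if http ≥ 400 then 3 else 0

-- ===== PRECONDITION & SPEC =====
def Spec_evaluar_seguridad (datos : List (String × List (String × Int))) (out : Int) : Prop := out = evaluar_seguridad_alt datos
instance (datos : List (String × List (String × Int))) (out : Int) : Decidable (Spec_evaluar_seguridad datos out) := by unfold Spec_evaluar_seguridad; infer_instance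

-- ===== CLAIM (what is proved, stated in full; the proofs are below) =====
def Claim_equal_evaluar_seguridad : Prop := ∀ (datos : List (String × List (String × Int))), Dom_evaluar_seguridad datos → Spec_evaluar_seguridad datos (evaluar_seguridad datos)

-- ===== LEMMAS AND PROOFS =====

-- the value B extracts from a looked-up Reddit entry
def pvInner (v : List (String × Int)) : Int :=
  match (PySem.Dict.ofList v).get? "http_status" with
  | none => 0
  | some http => if http ≥ 400 then 3 else 0

lemma pvStepA_eq (r : Int) (p : String × List (String × Int)) (h : p.1 = "Reddit") :
    pvStepA r p = r + pvInner p.2 := by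
  unfold pvStepA pvInner
  simp only [h, beq_self_eq_true, if_true]
  rw [PySem.Dict.contains_eq_isSome_get?]
  cases hg : (PySem.Dict.ofList p.2).get? "http_status" with
  | none => simp
  | some http =>
    simp only [Option.isSome_some, if_true]
    rw [PySem.Dict.getD_eq_get?_getD, hg]
    simp only [Option.getD_some]
    split_ifs <;> omega

lemma pvStepA_skip (r : Int) (p : String × List (String × Int)) (h : p.1 ≠ "Reddit") :
    pvStepA r p = r := by
  unfold pvStepA
  simp [h]

lemma foldl_no_reddit (l : List (String × List (String × Int))) (r : Int)
    (h : "Reddit" ∉ l.map (·.1)) : l.foldl pvStepA r = r := by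
  induction l generalizing r with
  | nil => rfl
  | cons p rest ih =>
    simp only [List.map_cons, List.mem_cons] at h
    rw [not_or] at h
    rw [List.foldl_cons, pvStepA_skip r p (fun he => h.1 he.symm), ih r h.2]

lemma foldl_items (l : List (String × List (String × Int))) (r : Int)
    (h : (l.map (·.1)).Nodup) :
    l.foldl pvStepA r = r + (match (PySem.Dict.mk l).get? "Reddit" with
      | none => 0
      | some red => pvInner red) := by
  induction l generalizing r with
  | nil =>
    simp
    rfl
  | cons p rest ih =>
    obtain ⟨k, v⟩ := p
    simp only [List.map_cons, List.nodup_cons] at h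
    rw [List.foldl_cons, PySem.Dict.get?_mk_cons]
    by_cases hk : k = "Reddit"
    · subst hk
      rw [pvStepA_eq r ⟨"Reddit", v⟩ rfl]
      simp only [beq_self_eq_true, if_true]
      exact foldl_no_reddit rest _ h.1
    · rw [pvStepA_skip r ⟨k, v⟩ hk, ih r h.2]
      simp [hk]

lemma dict_eq_mk_items {κ ν : Type} [BEq κ] (d : PySem.Dict κ ν) : d = PySem.Dict.mk d.items := by
  cases d; rfl

-- ===== VERDICT (by name: the statement is the Claim_ definition above) =====
theorem evaluar_seguridad_spec : Claim_equal_evaluar_seguridad := by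
  intro datos _
  unfold Spec_evaluar_seguridad evaluar_seguridad evaluar_seguridad_alt
  rw [foldl_items _ 0 (by
    have := PySem.Dict.nodup_keys_ofList (ps := datos)
    simpa [PySem.Dict.keys] using this)]
  rw [← dict_eq_mk_items]
  cases (PySem.Dict.ofList datos).get? "Reddit" <;> simp [pvInner]
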